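-- pv_equiv track=rewrite | github.com/symbat28/labss2025 | lab3/1.py | spy_games
-- ===== SOURCE A (Python) =====
-- def spy_games(num):
--     n=[0,0,7]
--     for x in num:
--         if x==n[0]:
--             n.pop(0)
--         if not n:
--             return True
--     return False
-- ===== SOURCE B (Python) =====
-- def spy_games(num):
--     zeros = 0
--     for x in num:
--         if x == 0:
--             zeros += 1
--         elif x == 7 and zeros >= 2:
--             return True
--     return False
-- ===== Notes on version B (the rewrite author's own statement) =====
-- stated objective: simpler
-- what changed: Replaces A's mutable pending-target list (popping matched heads of [0,0,7]) with the characterization 'some 7 is preceded by at least two 0s': a single integer counter of zeros seen so far, returning True at the first 7 with counter >= 2.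
import Mathlib
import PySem

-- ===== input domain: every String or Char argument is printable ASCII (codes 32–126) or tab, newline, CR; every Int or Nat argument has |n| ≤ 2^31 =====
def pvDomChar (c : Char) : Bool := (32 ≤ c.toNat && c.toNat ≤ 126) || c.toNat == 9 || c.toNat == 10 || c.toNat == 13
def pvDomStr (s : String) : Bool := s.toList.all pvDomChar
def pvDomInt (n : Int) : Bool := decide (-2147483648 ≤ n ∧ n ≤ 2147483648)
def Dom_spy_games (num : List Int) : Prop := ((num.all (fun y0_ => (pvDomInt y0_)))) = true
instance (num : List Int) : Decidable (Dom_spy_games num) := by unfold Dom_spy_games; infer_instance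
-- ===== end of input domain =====

-- B drops A's mutable pending-target list for a zero counter: true iff some 7 has ≥ 2 zeros before it (simpler).

-- ===== PORT A =====
-- A's loop over num with the mutable list n of remaining targets; n is never empty
-- when n[0] is read (A returns True the moment n empties), so head? is exact here.
def spyGoA (n : List Int) (num : List Int) : Bool :=
  match num with
  | [] => false
  | x :: xs =>
    let n' := if n.head? = some x then n.tail else n
    if n'.isEmpty then true else spyGoA n' xs

def spy_games (num : List Int) : Bool := spyGoA [0, 0, 7] num

-- ===== PORT B =====
-- B's loop with its zeros counter (a nonnegative Python int, hence Nat).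
def spyGoB (zeros : Nat) (num : List Int) : Bool :=
  match num with
  | [] => false
  | x :: xs =>
    if x = 0 then spyGoB (zeros + 1) xs
    else if x = 7 ∧ 2 ≤ zeros then true
    else spyGoB zeros xs

def spy_games_alt (num : List Int) : Bool := spyGoB 0 num

-- ===== PRECONDITION & SPEC =====
def Spec_spy_games (num : List Int) (out : Bool) : Prop := out = spy_games_alt num
instance (num : List Int) (out : Bool) : Decidable (Spec_spy_games num out) := by unfold Spec_spy_games; infer_instance

-- ===== CLAIM (what is proved, stated in full; the proofs are below) =====
def Claim_equal_spy_games : Prop := ∀ (num : List Int), Dom_spy_games num → Spec_spy_games num (spy_games num)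

-- ===== LEMMAS AND PROOFS =====

-- A's remaining-target list as a function of B's zero count
def spySt : Nat → List Int
  | 0 => [0, 0, 7]
  | 1 => [0, 7]
  | _ + 2 => [7]

theorem spySt_ge_two {z : Nat} (h : 2 ≤ z) : spySt z = [7] := by
  match z, h with
  | n + 2, _ => rfl

theorem spyGoA_eq_goB (num : List Int) :
    ∀ z : Nat, spyGoA (spySt z) num = spyGoB z num := by
  induction num with
  | nil => intro z; cases z with
    | zero => rfl
    | succ n => cases n <;> rfl
  | cons x xs ih =>
    intro z
    match z with
    | 0 =>
      by_cases hx : x = 0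
      · subst hx
        simpa [spyGoA, spySt, spyGoB] using ih 1
      · have h7 : ¬ (x = 7 ∧ 2 ≤ (0 : Nat)) := by rintro ⟨_, h⟩; omega
        have hx' : ((0 : Int) = x) = False := by simp [eq_comm, hx]
        simpa [spyGoA, spySt, spyGoB, hx, h7, hx'] using ih 0
    | 1 =>
      by_cases hx : x = 0
      · subst hx
        simpa [spyGoA, spySt, spyGoB] using ih 2
      · have h7 : ¬ (x = 7 ∧ 2 ≤ (1 : Nat)) := by rintro ⟨_, h⟩; omega
        have hx' : ((0 : Int) = x) = False := by simp [eq_comm, hx]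
        simpa [spyGoA, spySt, spyGoB, hx, h7, hx'] using ih 1
    | n + 2 =>
      by_cases hx : x = 7
      · subst hx
        simp [spyGoA, spySt, spyGoB]
      · by_cases hx0 : x = 0
        · subst hx0
          have := ih (n + 3)
          rw [spySt_ge_two (by omega)] at this
          simpa [spyGoA, spySt, spyGoB] using this
        · have h7 : ¬ (x = 7 ∧ 2 ≤ n + 2) := by rintro ⟨h, _⟩; exact hx h
          have hx7 : ((7 : Int) = x) = False := by simp [eq_comm, hx]
          have hx0' : ((0 : Int) = x) = False := by simp [eq_comm, hx0]
          simpa [spyGoA, spySt, spyGoB, hx0, hx, h7, hx7, hx0'] using ih (n + 2)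

-- ===== VERDICT (by name: the statement is the Claim_ definition above) =====
theorem spy_games_spec : Claim_equal_spy_games := by
  intro num _
  unfold Spec_spy_games spy_games spy_games_alt
  simpa [spySt] using spyGoA_eq_goB num 0
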